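-- pv_equiv track=rewrite | github.com/YabseraBogale/python-Scripts | Simple Encryption #1 - Alternating Split.py | decrypt
-- ===== SOURCE A (Python) =====
-- def Dec(encrypted_text):
--     enc=encrypted_text
--     odd=[]
--     even=[]
--     if(len(enc)%2==0):
--         i=0
--         while i<len(enc)/2:
--             odd.append(enc[i])
--             i+=1
--         while i<len(enc):
--             even.append(enc[i])
--             i+=1
--     else:
--         i=0
--         while i<len(enc)/2-1:
--             odd.append(enc[i])
--             i+=1
--         while i<len(enc):
--             even.append(enc[i])
--             i+=1
--
--     dec=""
--     if len(enc)%2==0: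
--         j=0
--         i=0
--         while i<len(even) and j<len(odd):
--             dec+=even[i]+odd[j]
--             i+=1
--             j+=1
--     else:
--         i=0
--         while i<len(even):
--             if i<len(odd):
--                dec+=even[i]+odd[i]
--             else:
--                 dec+=even[i]
--             i+=1
--
--     return dec
--
-- def decrypt(encrypted_text, n):
--     if encrypted_text is None:
--         return None
--     dec=Dec(encrypted_text)
--     i=1
--     if n<=0:
--         return encrypted_text
--     elif n==1:
--         return dec
--     else:
--         while i<n:
--             dec=Dec(dec)
--             i+=1
--     return dec
-- ===== SOURCE B (Python) =====
-- def _step(s):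
--     # one alternating-split decryption round, via slices/zip
--     h = len(s) // 2
--     return ''.join(a + b for a, b in zip(s[h:], s[:h])) + s[2 * h:]
--
-- def decrypt(encrypted_text, n):
--     if encrypted_text is None:
--         return None
--     if n <= 0:
--         return encrypted_text
--     t = encrypted_text
--     s = _step(t)
--     p = 1
--     while s != t and p < n:
--         s = _step(s)
--         p += 1
--     if s != t:
--         return s
--     # period p found: _step^p(t) == t, so only n % p rounds are needed
--     r = n % p
--     for _ in range(r):
--         t = _step(t)
--     return t
-- ===== Notes on version B (the rewrite author's own statement) =====
-- stated objective: faster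
-- what changed: B replaces A's index-by-index while-loops with a slice/zip interleave per round and, instead of always running n rounds, detects the first round p at which the text returns to itself and then runs only n mod p rounds.
import Mathlib
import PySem

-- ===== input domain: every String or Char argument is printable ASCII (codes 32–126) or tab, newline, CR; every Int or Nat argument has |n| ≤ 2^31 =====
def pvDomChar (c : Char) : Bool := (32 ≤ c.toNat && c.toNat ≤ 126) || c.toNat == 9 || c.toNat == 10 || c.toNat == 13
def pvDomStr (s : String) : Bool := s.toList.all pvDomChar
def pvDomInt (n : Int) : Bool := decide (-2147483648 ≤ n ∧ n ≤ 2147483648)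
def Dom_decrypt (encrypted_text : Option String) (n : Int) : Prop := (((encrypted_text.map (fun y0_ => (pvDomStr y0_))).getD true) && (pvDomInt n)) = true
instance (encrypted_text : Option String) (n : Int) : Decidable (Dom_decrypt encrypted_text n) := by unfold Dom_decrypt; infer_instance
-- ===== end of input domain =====

-- B replaces A's per-round while-loops by a slice/zip round and, instead of always running n
-- rounds, detects the first round p with step^p(t) = t and runs only n mod p rounds (objective: faster).

-- ===== PORT A =====
-- one generic 'while cond(i): acc.append(enc[i]); i+=1' loop of Dec; indices stay in range,
-- so Python's enc[i] (IndexError impossible here) is ported as pyGetD with a dummy default.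
def decAWhile (enc : List Char) (cond : Int → Bool) (i : Int) (acc : List Char) : Nat → List Char × Int
  | 0 => (acc, i)
  | fuel+1 =>
    if cond i then decAWhile enc cond (i + 1) (acc ++ [PySem.List.pyGetD enc i ' ']) fuel
    else (acc, i)

-- 'while i<len(even) and j<len(odd): dec+=even[i]+odd[j]' of Dec's even branch
def decAMergeEven (ev od : List Char) (i j : Int) (dec : List Char) : Nat → List Char
  | 0 => dec
  | fuel+1 =>
    if i < (ev.length : Int) ∧ j < (od.length : Int) then
      decAMergeEven ev od (i + 1) (j + 1)
        (dec ++ [PySem.List.pyGetD ev i ' ', PySem.List.pyGetD od j ' ']) fuel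
    else dec

-- 'while i<len(even): if i<len(odd): dec+=even[i]+odd[i] else: dec+=even[i]' of Dec's odd branch
def decAMergeOdd (ev od : List Char) (i : Int) (dec : List Char) : Nat → List Char
  | 0 => dec
  | fuel+1 =>
    if i < (ev.length : Int) then
      if i < (od.length : Int) then
        decAMergeOdd ev od (i + 1) (dec ++ [PySem.List.pyGetD ev i ' ', PySem.List.pyGetD od i ' ']) fuel
      else
        decAMergeOdd ev od (i + 1) (dec ++ [PySem.List.pyGetD ev i ' ']) fuel
    else dec

-- Dec: Python's float comparisons 'i < len/2' and 'i < len/2-1' are exact here (|len| < 2^53),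
-- ported as the equivalent integer inequalities 2*i < L and 2*i < L - 2.
def decA (enc : List Char) : List Char :=
  let L : Int := enc.length
  let oddEven : List Char × List Char :=
    if L % 2 == 0 then
      let r1 := decAWhile enc (fun i => decide (2 * i < L)) 0 [] enc.length
      let r2 := decAWhile enc (fun i => decide (i < L)) r1.2 [] enc.length
      (r1.1, r2.1)
    else
      let r1 := decAWhile enc (fun i => decide (2 * i < L - 2)) 0 [] enc.length
      let r2 := decAWhile enc (fun i => decide (i < L)) r1.2 [] enc.length
      (r1.1, r2.1)
  if L % 2 == 0 then decAMergeEven oddEven.2 oddEven.1 0 0 [] oddEven.2.length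
  else decAMergeOdd oddEven.2 oddEven.1 0 [] oddEven.2.length

-- 'i=1; while i<n: dec=Dec(dec); i+=1' (runs n-1 times, so fuel (n-1).toNat suffices)
def decAIter (n i : Int) (dec : List Char) : Nat → List Char
  | 0 => dec
  | fuel+1 => if i < n then decAIter n (i + 1) (decA dec) fuel else dec

def decrypt (encrypted_text : Option String) (n : Int) : Option String :=
  match encrypted_text with
  | none => none
  | some s =>
    let dec := decA s.toList
    if n ≤ 0 then some s
    else if n = 1 then some (String.ofList dec)
    else some (String.ofList (decAIter n 1 dec (n - 1).toNat))

-- ===== PORT B =====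
-- _step: ''.join(a+b for a,b in zip(s[h:], s[:h])) + s[2*h:]
def stepB (s : List Char) : List Char :=
  let h := s.length / 2
  ((s.drop h).zip (s.take h)).flatMap (fun ab => [ab.1, ab.2]) ++ s.drop (2 * h)

-- 'while s != t and p < n: s=_step(s); p+=1' (runs at most n-1 times, fuel n.toNat suffices)
def altLoop (t : List Char) (n : Int) (s : List Char) (p : Int) : Nat → List Char × Int
  | 0 => (s, p)
  | fuel+1 =>
    if s ≠ t ∧ p < n then altLoop t n (stepB s) (p + 1) fuel else (s, p)

-- 'for _ in range(r): t = _step(t)'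
def repeatStep : Nat → List Char → List Char
  | 0, t => t
  | k+1, t => repeatStep k (stepB t)

def decrypt_alt (encrypted_text : Option String) (n : Int) : Option String :=
  match encrypted_text with
  | none => none
  | some str =>
    if n ≤ 0 then some str
    else
      let t := str.toList
      match altLoop t n (stepB t) 1 n.toNat with
      | (s, p) =>
        if s ≠ t then some (String.ofList s)
        else some (String.ofList (repeatStep (PySem.Int.mod n p).toNat t))

-- ===== PRECONDITION & SPEC =====
def Spec_decrypt (encrypted_text : Option String) (n : Int) (out : Option String) : Prop := out = decrypt_alt encrypted_text n
instance (encrypted_text : Option String) (n : Int) (out : Option String) : Decidable (Spec_decrypt encrypted_text n out) := by unfold Spec_decrypt; infer_instance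

-- ===== CLAIM (what is proved, stated in full; the proofs are below) =====
def Claim_equal_decrypt : Prop := ∀ (encrypted_text : Option String) (n : Int), Dom_decrypt encrypted_text n → Spec_decrypt encrypted_text n (decrypt encrypted_text n)

-- ===== LEMMAS AND PROOFS =====

-- proof-side normal form of one decryption round
def interleave : List Char → List Char → List Char
  | [], _ => []
  | e :: es, [] => e :: interleave es []
  | e :: es, o :: os => e :: o :: interleave es os

def core (t : List Char) : List Char :=
  interleave (t.drop (t.length / 2)) (t.take (t.length / 2))

theorem interleave_nil (r : List Char) : interleave r [] = r := by
  induction r with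
  | nil => rfl
  | cons a as ih => simp [interleave, ih]

theorem decAWhile_spec (enc : List Char) (cond : Int → Bool) (stop : Int)
    (hc : ∀ i, cond i = decide (i < stop)) (hstop : stop ≤ (enc.length : Int)) :
    ∀ (fuel : Nat) (i : Int) (acc : List Char), 0 ≤ i → (stop - i).toNat ≤ fuel →
      decAWhile enc cond i acc fuel = (acc ++ (enc.drop i.toNat).take (stop - i).toNat, max i stop) := by
  intro fuel
  induction fuel with
  | zero =>
    intro i acc hi hf
    have h0 : (stop - i).toNat = 0 := by omega
    have hmax : max i stop = i := by omega
    simp [decAWhile, h0, hmax]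
  | succ fuel ih =>
    intro i acc hi hf
    by_cases h : i < stop
    · have hcond : cond i = true := by rw [hc]; simp [h]
      have hlt : i.toNat < enc.length := by omega
      have hget : PySem.List.pyGetD enc i ' ' = enc[i.toNat] :=
        PySem.List.pyGetD_eq_getElem _ _ hi (by omega)
      have hdrop : enc.drop i.toNat = enc[i.toNat] :: enc.drop (i.toNat + 1) :=
        List.drop_eq_getElem_cons hlt
      rw [decAWhile, hcond]
      simp only [if_true]
      rw [ih (i + 1) (acc ++ [PySem.List.pyGetD enc i ' ']) (by omega) (by omega)]
      have h1 : (i + 1).toNat = i.toNat + 1 := by omega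
      have h2 : (stop - i).toNat = (stop - (i + 1)).toNat + 1 := by omega
      rw [h1, h2, hdrop, hget]
      refine Prod.ext ?_ ?_
      · simp only []
        rw [List.take_succ_cons]
        simp
      · simp; omega
    · have hcond : cond i = false := by rw [hc]; simp [h]
      rw [decAWhile, hcond]
      have h0 : (stop - i).toNat = 0 := by omega
      have hmax : max i stop = i := by omega
      simp [h0, hmax]

theorem decAMergeEven_spec (ev od : List Char) (hlen : ev.length = od.length) :
    ∀ (fuel k : Nat) (dec : List Char), ev.length - k ≤ fuel →
      decAMergeEven ev od (k : Int) (k : Int) dec fuel = dec ++ interleave (ev.drop k) (od.drop k) := by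
  intro fuel
  induction fuel with
  | zero =>
    intro k dec hf
    have hk : ev.length ≤ k := by omega
    rw [List.drop_eq_nil_of_le hk, List.drop_eq_nil_of_le (by omega)]
    simp [decAMergeEven, interleave]
  | succ fuel ih =>
    intro k dec hf
    by_cases hk : k < ev.length
    · have hko : k < od.length := by omega
      rw [decAMergeEven, if_pos ⟨by exact_mod_cast hk, by exact_mod_cast hko⟩]
      have hc1 : ((k : Int) + 1) = ((k + 1 : Nat) : Int) := by push_cast; ring
      rw [hc1, ih (k + 1) _ (by omega)]
      rw [List.drop_eq_getElem_cons hk, List.drop_eq_getElem_cons hko, interleave]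
      have hge : PySem.List.pyGetD ev (k : Int) ' ' = ev[k] := by
        simp [PySem.List.pyGetD_natCast, List.getD_eq_getElem?_getD, hk]
      have hgo : PySem.List.pyGetD od (k : Int) ' ' = od[k] := by
        simp [PySem.List.pyGetD_natCast, List.getD_eq_getElem?_getD, hko]
      rw [hge, hgo]
      simp
    · rw [decAMergeEven, if_neg (fun h => hk (by exact_mod_cast h.1))]
      rw [List.drop_eq_nil_of_le (by omega), List.drop_eq_nil_of_le (by omega)]
      simp [interleave]

theorem decAMergeOdd_spec (ev od : List Char) (hlen : ev.length = od.length + 1) :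
    ∀ (fuel k : Nat) (dec : List Char), ev.length - k ≤ fuel →
      decAMergeOdd ev od (k : Int) dec fuel = dec ++ interleave (ev.drop k) (od.drop k) := by
  intro fuel
  induction fuel with
  | zero =>
    intro k dec hf
    have hk : ev.length ≤ k := by omega
    rw [List.drop_eq_nil_of_le hk, List.drop_eq_nil_of_le (by omega)]
    simp [decAMergeOdd, interleave]
  | succ fuel ih =>
    intro k dec hf
    by_cases hk : k < ev.length
    · rw [decAMergeOdd, if_pos (by exact_mod_cast hk)]
      have hc1 : ((k : Int) + 1) = ((k + 1 : Nat) : Int) := by push_cast; ring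
      have hge : PySem.List.pyGetD ev (k : Int) ' ' = ev[k] := by
        simp [PySem.List.pyGetD_natCast, List.getD_eq_getElem?_getD, hk]
      by_cases hko : k < od.length
      · rw [if_pos (by exact_mod_cast hko), hc1, ih (k + 1) _ (by omega)]
        rw [List.drop_eq_getElem_cons hk, List.drop_eq_getElem_cons hko, interleave]
        have hgo : PySem.List.pyGetD od (k : Int) ' ' = od[k] := by
          simp [PySem.List.pyGetD_natCast, List.getD_eq_getElem?_getD, hko]
        rw [hge, hgo]
        simp
      · rw [if_neg (by exact_mod_cast hko), hc1, ih (k + 1) _ (by omega)]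
        have h1 : List.drop (k + 1) ev = [] := List.drop_eq_nil_of_le (by omega)
        have h2 : List.drop (k + 1) od = [] := List.drop_eq_nil_of_le (by omega)
        have h3 : List.drop k od = [] := List.drop_eq_nil_of_le (by omega)
        rw [List.drop_eq_getElem_cons hk, h1, h2, h3, hge]
        simp [interleave]
    · rw [decAMergeOdd, if_neg (by exact_mod_cast hk)]
      rw [List.drop_eq_nil_of_le (by omega), List.drop_eq_nil_of_le (by omega)]
      simp [interleave]

theorem zip_flat_interleave : ∀ (l r : List Char), l.length ≤ r.length →
    (r.zip l).flatMap (fun ab => [ab.1, ab.2]) ++ r.drop l.length = interleave r l := by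
  intro l
  induction l with
  | nil => intro r _; simp [interleave_nil]
  | cons x xs ih =>
    intro r hr
    match r with
    | [] => simp at hr
    | a :: as =>
      simp only [List.zip_cons_cons, List.flatMap_cons, List.length_cons, List.drop_succ_cons,
        interleave]
      rw [← ih as (by simpa using hr)]
      simp

theorem decA_eq (enc : List Char) : decA enc = core enc := by
  by_cases hpar : (enc.length : Int) % 2 = 0
  · have hbeq : ((enc.length : Int) % 2 == 0) = true := by simp [hpar]
    have hc : ∀ i : Int, decide (2 * i < (enc.length : Int)) = decide (i < (enc.length : Int) / 2) := by
      intro i; simp only [decide_eq_decide]; omega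
    have e1 := decAWhile_spec enc _ ((enc.length : Int) / 2) hc (by omega) enc.length 0 [] (by omega) (by omega)
    have hc2 : ∀ i : Int, decide (i < (enc.length : Int)) = decide (i < (enc.length : Int)) := fun _ => rfl
    have e2 := decAWhile_spec enc _ ((enc.length : Int)) hc2 (by omega) enc.length
      (max 0 ((enc.length : Int) / 2)) [] (by omega) (by omega)
    have hh : ((enc.length : Int) / 2).toNat = enc.length / 2 := by omega
    have hmax : max (0 : Int) ((enc.length : Int) / 2) = (enc.length : Int) / 2 := by omega
    rw [hmax] at e2
    have ht1 : (((enc.length : Int) / 2) - 0).toNat = enc.length / 2 := by omega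
    have ht2 : ((enc.length : Int) - (enc.length : Int) / 2).toNat = enc.length - enc.length / 2 := by omega
    unfold decA
    simp only [hbeq, if_true, e1]
    simp only [hmax]
    simp only [e2]
    simp only [ht1, ht2, Int.toNat_zero, List.drop_zero, List.nil_append, hh]
    have hev : (enc.drop (enc.length / 2)).take (enc.length - enc.length / 2) = enc.drop (enc.length / 2) :=
      List.take_of_length_le (by simp)
    rw [hev]
    have hlen : (enc.drop (enc.length / 2)).length = (enc.take (enc.length / 2)).length := by
      simp; omega
    have := decAMergeEven_spec (enc.drop (enc.length / 2)) (enc.take (enc.length / 2)) hlen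
      (enc.drop (enc.length / 2)).length 0 [] (by omega)
    simpa [core] using this
  · have hbeq : ((enc.length : Int) % 2 == 0) = false := by simp [hpar]
    have hc : ∀ i : Int, decide (2 * i < (enc.length : Int) - 2) = decide (i < (enc.length : Int) / 2) := by
      intro i; simp only [decide_eq_decide]; omega
    have e1 := decAWhile_spec enc _ ((enc.length : Int) / 2) hc (by omega) enc.length 0 [] (by omega) (by omega)
    have hc2 : ∀ i : Int, decide (i < (enc.length : Int)) = decide (i < (enc.length : Int)) := fun _ => rfl
    have e2 := decAWhile_spec enc _ ((enc.length : Int)) hc2 (by omega) enc.length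
      (max 0 ((enc.length : Int) / 2)) [] (by omega) (by omega)
    have hh : ((enc.length : Int) / 2).toNat = enc.length / 2 := by omega
    have hmax : max (0 : Int) ((enc.length : Int) / 2) = (enc.length : Int) / 2 := by omega
    rw [hmax] at e2
    have ht1 : (((enc.length : Int) / 2) - 0).toNat = enc.length / 2 := by omega
    have ht2 : ((enc.length : Int) - (enc.length : Int) / 2).toNat = enc.length - enc.length / 2 := by omega
    unfold decA
    simp only [hbeq, Bool.false_eq_true, if_false, e1]
    simp only [hmax]
    simp only [e2]
    simp only [ht1, ht2, Int.toNat_zero, List.drop_zero, List.nil_append, hh]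
    have hev : (enc.drop (enc.length / 2)).take (enc.length - enc.length / 2) = enc.drop (enc.length / 2) :=
      List.take_of_length_le (by simp)
    rw [hev]
    have hlen : (enc.drop (enc.length / 2)).length = (enc.take (enc.length / 2)).length + 1 := by
      simp; omega
    have := decAMergeOdd_spec (enc.drop (enc.length / 2)) (enc.take (enc.length / 2)) hlen
      (enc.drop (enc.length / 2)).length 0 [] (by omega)
    simpa [core] using this

theorem stepB_eq (s : List Char) : stepB s = core s := by
  have h1 : (s.take (s.length / 2)).length = s.length / 2 := by simp; omega
  have h2 : s.drop (2 * (s.length / 2)) = (s.drop (s.length / 2)).drop (s.length / 2) := by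
    rw [List.drop_drop]; congr 1; omega
  simp only [stepB, core]
  rw [← zip_flat_interleave (s.take (s.length / 2)) (s.drop (s.length / 2)) (by simp; omega)]
  rw [h1, h2]

theorem decAIter_spec (n : Int) :
    ∀ (fuel : Nat) (i : Int) (dec : List Char), n ≤ i + fuel →
      decAIter n i dec fuel = core^[(n - i).toNat] dec := by
  intro fuel
  induction fuel with
  | zero =>
    intro i dec hf
    have : (n - i).toNat = 0 := by omega
    simp [decAIter, this]
  | succ fuel ih =>
    intro i dec hf
    rw [decAIter]
    by_cases h : i < n
    · rw [if_pos h, ih (i + 1) _ (by omega), decA_eq]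
      have : (n - i).toNat = (n - (i + 1)).toNat + 1 := by omega
      rw [this, Function.iterate_succ_apply]
    · rw [if_neg h]
      have : (n - i).toNat = 0 := by omega
      simp [this]

theorem repeatStep_spec : ∀ (k : Nat) (t : List Char), repeatStep k t = core^[k] t := by
  intro k
  induction k with
  | zero => intro t; simp [repeatStep]
  | succ k ih =>
    intro t
    rw [repeatStep, ih, stepB_eq, Function.iterate_succ_apply]

theorem period_iter (p : Nat) (t : List Char) (hp : 0 < p) (hper : core^[p] t = t) :
    ∀ m, core^[m] t = core^[m % p] t := by
  intro m
  induction m using Nat.strong_induction_on with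
  | _ m ih =>
    by_cases hm : m < p
    · rw [Nat.mod_eq_of_lt hm]
    · have hsplit : m = (m - p) + p := by omega
      rw [Nat.mod_eq_sub_mod (by omega), ← ih (m - p) (by omega)]
      conv_lhs => rw [hsplit]
      rw [Function.iterate_add_apply, hper]

theorem altLoop_spec (t : List Char) (n : Int) :
    ∀ (fuel : Nat) (p : Int) (s : List Char), 1 ≤ p → p ≤ n → s = core^[p.toNat] t →
      n ≤ p + fuel →
      (altLoop t n s p fuel).1 = core^[(altLoop t n s p fuel).2.toNat] t ∧
      1 ≤ (altLoop t n s p fuel).2 ∧ (altLoop t n s p fuel).2 ≤ n ∧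
      ((altLoop t n s p fuel).1 = t ∨ (altLoop t n s p fuel).2 = n) := by
  intro fuel
  induction fuel with
  | zero =>
    intro p s hp1 hpn hs hf
    simp only [altLoop]
    exact ⟨hs, hp1, hpn, Or.inr (by omega)⟩
  | succ fuel ih =>
    intro p s hp1 hpn hs hf
    rw [altLoop]
    by_cases hcond : s ≠ t ∧ p < n
    · rw [if_pos hcond]
      refine ih (p + 1) (stepB s) (by omega) (by omega) ?_ (by omega)
      rw [stepB_eq, hs]
      have hsucc : (p + 1).toNat = p.toNat + 1 := by omega
      rw [hsucc, Function.iterate_succ_apply']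
    · rw [if_neg hcond]
      refine ⟨hs, hp1, hpn, ?_⟩
      by_cases hst : s = t
      · exact Or.inl hst
      · right
        have : ¬ p < n := fun h => hcond ⟨hst, h⟩
        omega

-- ===== VERDICT (by name: the statement is the Claim_ definition above) =====
theorem decryptA_of_pos (str : String) (n : Int) (hn : ¬ n ≤ 0) :
    decrypt (some str) n = some (String.ofList (core^[n.toNat] str.toList)) := by
  unfold decrypt
  simp only [if_neg hn]
  by_cases h1 : n = 1
  · subst h1
    simp [decA_eq]
  · rw [if_neg h1]
    rw [decAIter_spec n (n - 1).toNat 1 _ (by omega), decA_eq,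
      ← Function.iterate_succ_apply]
    have : (n - 1).toNat.succ = n.toNat := by omega
    rw [this]

theorem decryptB_of_pos (str : String) (n : Int) (hn : ¬ n ≤ 0) :
    decrypt_alt (some str) n = some (String.ofList (core^[n.toNat] str.toList)) := by
  unfold decrypt_alt
  simp only [if_neg hn]
  have spec := altLoop_spec str.toList n n.toNat 1 (stepB str.toList) (by omega) (by omega)
    (by rw [stepB_eq]; simp) (by omega)
  rcases hres : altLoop str.toList n (stepB str.toList) 1 n.toNat with ⟨s, p⟩
  rw [hres] at spec
  obtain ⟨hs, hp1, hpn, hdisj⟩ := spec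
  simp only at hs hp1 hpn hdisj
  by_cases hst : s = str.toList
  · rw [if_neg (by simpa using hst)]
    have hper : core^[p.toNat] str.toList = str.toList := by rw [← hs, hst]
    have hmod : PySem.Int.mod n p = n % p := PySem.Int.mod_eq_emod_of_pos (by omega)
    have hn' : ((n.toNat : Nat) : Int) = n := Int.toNat_of_nonneg (by omega)
    have hp' : ((p.toNat : Nat) : Int) = p := Int.toNat_of_nonneg (by omega)
    have htn : (PySem.Int.mod n p).toNat = n.toNat % p.toNat := by
      rw [hmod]
      calc (n % p).toNat = (((n.toNat : Nat) : Int) % ((p.toNat : Nat) : Int)).toNat := by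
            rw [hn', hp']
        _ = (((n.toNat % p.toNat : Nat) : Int)).toNat := by rw [Int.natCast_mod]
        _ = n.toNat % p.toNat := Int.toNat_natCast _
    rw [repeatStep_spec, htn, ← period_iter p.toNat str.toList (by omega) hper n.toNat]
  · rw [if_pos (by simpa using hst)]
    have hp : p = n := hdisj.resolve_left hst
    rw [hs, hp]

theorem decrypt_spec : Claim_equal_decrypt := by
  unfold Claim_equal_decrypt Spec_decrypt
  intro et n _
  match et with
  | none => rfl
  | some str =>
    by_cases hn : n ≤ 0
    · unfold decrypt decrypt_alt
      simp [if_pos hn]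
    · rw [decryptA_of_pos str n hn, decryptB_of_pos str n hn]
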